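-- pv_equiv track=rewrite | github.com/yuxin101/skills | skills/vincentlau2046-sudo/technical-insight/architecture-workflow.py | _group_by_business_boundary
-- ===== SOURCE A (Python) =====
-- from typing import Dict, List, Any
--
-- def _group_by_business_boundary(components: List[Dict]) -> Dict[str, List[Dict]]:
--     """Group components by business boundaries"""
--     modules = {}
--     for comp in components:
--         file_path = comp['file_path']
--         # Simple heuristic: group by top-level directory
--         if '/' in file_path:
--             module_name = file_path.split('/')[0]
--         else:
--             module_name = 'core'
--
--         if module_name not in modules:
--             modules[module_name] = []
--         modules[module_name].append(comp)
--
--     return modules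
-- ===== SOURCE B (Python) =====
-- def _group_by_business_boundary(components):
--     """Group components by business boundaries (two-pass: ordered distinct module names, then one filter per module)."""
--     def _module(comp):
--         fp = comp['file_path']
--         return fp.split('/')[0] if '/' in fp else 'core'
--
--     names = []
--     for comp in components:
--         name = _module(comp)
--         if name not in names:
--             names.append(name)
--     return {name: [c for c in components if _module(c) == name] for name in names}
-- ===== Notes on version B (the rewrite author's own statement) =====
-- stated objective: alternative
-- what changed: Replaces A's single-pass hash-bucketing (mutating per-key lists in a dict) by a two-pass strategy: first collect the ordered distinct module names, then build the result with one list-filter per module name.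
import Mathlib
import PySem

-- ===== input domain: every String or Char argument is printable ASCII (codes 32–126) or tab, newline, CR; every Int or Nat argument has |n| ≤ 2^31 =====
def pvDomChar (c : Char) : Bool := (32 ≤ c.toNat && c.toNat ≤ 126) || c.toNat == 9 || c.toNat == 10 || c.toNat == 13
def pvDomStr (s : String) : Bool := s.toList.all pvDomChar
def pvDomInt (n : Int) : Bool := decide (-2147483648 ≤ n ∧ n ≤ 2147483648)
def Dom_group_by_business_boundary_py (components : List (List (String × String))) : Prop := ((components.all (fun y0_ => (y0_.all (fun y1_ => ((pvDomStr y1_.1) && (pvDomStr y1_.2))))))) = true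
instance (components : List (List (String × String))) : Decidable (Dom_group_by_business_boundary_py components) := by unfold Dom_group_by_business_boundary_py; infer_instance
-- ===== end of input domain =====

-- B groups by the same module key but in two passes (ordered distinct names, then one filter per name)
-- instead of A's single-pass dict bucketing; same result, stated objective: alternative decomposition.

-- ===== PORT A =====
def group_by_business_boundary_py (components : List (List (String × String))) : List (String × List (List (String × String))) :=
  (components.foldl
    (fun (modules : PySem.Dict String (List (List (String × String)))) comp =>
      -- comp['file_path'] raises KeyError when absent; Pre_ excludes that, the .getD "" is never reached inside Pre_
      let file_path := ((PySem.Dict.mk comp).get? "file_path").getD ""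
      let module_name := if PySem.Str.isIn "/" file_path then (((PySem.Str.split? file_path "/").getD []).headD "") else "core"
      let modules := if modules.contains module_name then modules else modules.insert module_name []
      modules.modify module_name [] (fun l => l ++ [comp]))
    PySem.Dict.empty).items

-- ===== PORT B =====
def pvModuleName (comp : List (String × String)) : String :=
  -- comp['file_path'] raises KeyError when absent; Pre_ excludes that, the .getD "" is never reached inside Pre_
  let fp := ((PySem.Dict.mk comp).get? "file_path").getD ""
  if PySem.Str.isIn "/" fp then (((PySem.Str.split? fp "/").getD []).headD "") else "core"

def group_by_business_boundary_py_alt (components : List (List (String × String))) : List (String × List (List (String × String))) :=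
  let names : PySem.Set String :=
    components.foldl (fun acc comp => PySem.Set.add acc (pvModuleName comp)) PySem.Set.empty
  (names.foldl
    (fun (d : PySem.Dict String (List (List (String × String)))) name =>
      d.insert name (components.filter (fun c => pvModuleName c == name)))
    PySem.Dict.empty).items

-- ===== PRECONDITION & SPEC =====
-- Pre_ excludes exactly the inputs on which the Python A raises KeyError: a component without a 'file_path' key.
def Pre_group_by_business_boundary_py (components : List (List (String × String))) : Prop :=
  (components.all (fun comp => comp.any (fun p => p.1 == "file_path"))) = true
instance (components : List (List (String × String))) : Decidable (Pre_group_by_business_boundary_py components) := by unfold Pre_group_by_business_boundary_py; infer_instance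
def pvWitness_group_by_business_boundary_py : (List (List (String × String))) :=
  [[("file_path", "app/main.py")], [("file_path", "util.py"), ("name", "U")]]

def Spec_group_by_business_boundary_py (components : List (List (String × String))) (out : List (String × List (List (String × String)))) : Prop := out = group_by_business_boundary_py_alt components
instance (components : List (List (String × String))) (out : List (String × List (List (String × String)))) : Decidable (Spec_group_by_business_boundary_py components out) := by unfold Spec_group_by_business_boundary_py; infer_instance

-- ===== CLAIM (what is proved, stated in full; the proofs are below) =====
def Claim_equal_group_by_business_boundary_py : Prop := ∀ (components : List (List (String × String))), Dom_group_by_business_boundary_py components → Pre_group_by_business_boundary_py components → Spec_group_by_business_boundary_py components (group_by_business_boundary_py components)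

-- ===== LEMMAS AND PROOFS =====

-- A's "if module_name not in modules: modules[module_name] = []; modules[module_name].append(comp)" is one Dict.modify
theorem pv_step_eq_modify (d : PySem.Dict String (List (List (String × String)))) (k : String)
    (c : List (String × String)) :
    (if d.contains k then d else d.insert k []).modify k [] (fun l => l ++ [c])
      = d.modify k [] (fun l => l ++ [c]) := by
  by_cases h : d.contains k = true
  · simp [h]
  · rw [if_neg (by simp [h])]
    have h' : d.contains k = false := by simpa using h
    simp only [PySem.Dict.modify, PySem.Dict.getD_insert_self, PySem.Dict.insert_insert_self,
      PySem.Dict.getD_of_not_contains d [] h']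

-- items of a Nodup-keyed dict are its keys paired with their getD values
theorem pv_items_eq_map_keys (d : PySem.Dict String (List (List (String × String))))
    (h : d.keys.Nodup) :
    d.items = d.keys.map (fun k => (k, d.getD k [])) := by
  conv_lhs => rw [show d.items = d.items.map id from (List.map_id _).symm]
  simp only [PySem.Dict.keys, List.map_map]
  apply List.map_congr_left
  intro p hp
  have h2 := PySem.Dict.getD_of_mem_items d (k := p.1) (v := p.2) (by simpa using hp) h []
  simp [Function.comp, h2]

-- A's whole loop, written as one modify per component
theorem pv_A_as_modify_fold (comps : List (List (String × String))) :
    group_by_business_boundary_py comps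
      = (comps.foldl (fun (d : PySem.Dict String (List (List (String × String)))) c =>
          d.modify (pvModuleName c) [] (fun l => l ++ [c])) PySem.Dict.empty).items := by
  unfold group_by_business_boundary_py
  congr 1
  apply PySem.List.foldl_congr_mem
  intro acc x _
  simpa [pvModuleName] using pv_step_eq_modify acc (pvModuleName x) x

theorem pv_A_keys (comps : List (List (String × String))) :
    (comps.foldl (fun (d : PySem.Dict String (List (List (String × String)))) c =>
        d.modify (pvModuleName c) [] (fun l => l ++ [c])) PySem.Dict.empty).keys
      = PySem.Set.ofList (comps.map pvModuleName) := by
  rw [PySem.Dict.keys_foldl_modify_key]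
  simp [PySem.Set.ofList_eq_foldl, PySem.Set.update]

theorem pv_A_getD (comps : List (List (String × String))) (k : String) :
    (comps.foldl (fun (d : PySem.Dict String (List (List (String × String)))) c =>
        d.modify (pvModuleName c) [] (fun l => l ++ [c])) PySem.Dict.empty).getD k []
      = comps.filter (fun c => pvModuleName c == k) := by
  have hmap : comps.foldl (fun (d : PySem.Dict String (List (List (String × String)))) c =>
        d.modify (pvModuleName c) [] (fun l => l ++ [c])) PySem.Dict.empty
      = (comps.map (fun c => (pvModuleName c, c))).foldl
          (fun d p => d.modify p.1 [] (fun l => l ++ [p.2])) PySem.Dict.empty := by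
    rw [List.foldl_map]
  rw [hmap, PySem.Dict.getD_foldl_modify_append]
  simp [List.filter_map, Function.comp_def]

-- ===== VERDICT (by name: the statement is the Claim_ definition above) =====
theorem group_by_business_boundary_py_spec : Claim_equal_group_by_business_boundary_py := by
  intro comps _ _
  unfold Spec_group_by_business_boundary_py
  -- B side: ordered distinct names, then one fresh insert per name
  have hnames : (comps.foldl (fun acc c => PySem.Set.add acc (pvModuleName c)) PySem.Set.empty)
      = PySem.Set.ofList (comps.map pvModuleName) := by
    rw [PySem.Set.ofList_eq_foldl, List.foldl_map]
    rfl
  have hnodup := PySem.Set.nodup_ofList (comps.map pvModuleName)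
  have hB : group_by_business_boundary_py_alt comps
      = (PySem.Set.ofList (comps.map pvModuleName)).map
          (fun k => (k, comps.filter (fun c => pvModuleName c == k))) := by
    unfold group_by_business_boundary_py_alt
    rw [hnames]
    show ((PySem.Set.ofList (comps.map pvModuleName)).foldl
        (fun (d : PySem.Dict String (List (List (String × String)))) name =>
          d.insert name (comps.filter (fun c => pvModuleName c == name))) PySem.Dict.empty).items = _
    rw [PySem.Dict.items_foldl_insert_fresh (PySem.Set.ofList (comps.map pvModuleName)) (fun n => n)
      (fun n => comps.filter (fun c => pvModuleName c == n)) PySem.Dict.empty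
      (fun a _ => PySem.Dict.contains_empty a) (by rw [List.map_id_fun']; exact hnodup)]
    simp [PySem.Dict.empty]
  -- A side
  have hAnodup : (comps.foldl (fun (d : PySem.Dict String (List (List (String × String)))) c =>
        d.modify (pvModuleName c) [] (fun l => l ++ [c])) PySem.Dict.empty).keys.Nodup := by
    exact PySem.Dict.nodup_keys_foldl_modify_key comps pvModuleName [] _ _ PySem.Dict.nodup_keys_empty
  rw [pv_A_as_modify_fold, pv_items_eq_map_keys _ hAnodup, pv_A_keys, hB]
  apply List.map_congr_left
  intro k _
  rw [pv_A_getD]
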